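/- GENERATED by mk_final_copies.py from the proof of the farm's unit `start_decoder.R15` (farm:start_decoder.R15.1: Proof.lean) as the
   re-elaboration sweep compiled it — do not edit. -/
import Asan.CheckWalk
import Vorbis.Spec.Units.start_decoder_R15
import Vorbis.Spec.Worked.start_decoder_R15_Lemmas

open X86 X86.User Asan Vorbis Vorbis.Spec Vorbis.Spec.StartDecoder

set_option maxRecDepth 4000
set_option maxHeartbeats 4000000

/-!
  Segment `start_decoder.R15` (0x115f97 – 0x116055): the head of the channel loop 4158; after it the two `init_blocksize`,
  `blocksize[0..1]`, `r15d = b1`, `r13 = 2·b1`, `max_part_read = 0`.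

  One lemma per returned callee state (the advice of the farm for big contexts):
    the main theorem   0x115f97 … the return of `init_blocksize(f, 0, b0)` (exit to R16 when `i < channels`);
    `seg2`             0x115fc9 … the return of `init_blocksize(f, 1, b1)` (exit to the epilogue when the first returned 0);
    `seg3`             0x115ff0 … 0x116059 (exit to the epilogue when the second returned 0; else the entry assertion of R17).
  The pure part (what is carried over the stores and the two callees: `Carried`, `core_carry`, `core_after_ib`, `tabs_keep`,
  `r17_of_core`) is in Lemmas.lean.
-/

namespace Vorbis.Spec.start_decoder_R15

/-- **0x115fc9 … 0x115feb and the return of the second `init_blocksize`** (C line 4170's test, line 4171's call): `eax = 0` → the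
epilogue; else the check of `f->blocksize_1`, the call, and the assertion after it, with the tables of index 0 carried over. -/
theorem seg2 (Lay : Layout) (hLay : Lay.hi = 0x1000000) (μ : Microarch) (hμ : UserX.MicroOK μ) (u₀ : State)
    (hcode : HasCodeNat Lay u₀ Vorbis.L.start_decoder.entry Vorbis.Code.code_start_decoder.nat Vorbis.L.start_decoder.size)
    (hload4 : Asan.SmallCheck Lay μ Vorbis.WayInv (Vorbis.CodeOK u₀) [.rax, .rcx, .rdx] 4 Vorbis.L.__asan_load4_noabort.entry)
    (hib : ∀ (others : List Obj) (frames : List (Nat × FrameLayout)) (A : Arena) (k : Nat),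
      Calls Lay μ Vorbis.WayInv (Vorbis.conv u₀) Vorbis.L.init_blocksize.entry (Vorbis.Spec.init_blocksize.spec others frames A k))
    (g : Ghost) (r : State) (hat : AtRetIB u₀ g Vorbis.L.start_decoder.cut275 0 r) :
    ReachVia Lay μ WayInv r (fun w => AtRetIB u₀ g Vorbis.L.start_decoder.cut276 1 w ∨ AtERR u₀ g w) := by
  obtain ⟨A9, A10, A, i, w_rip, hrspR, hrbpR, hinv, hcore, hrax, _, htab0⟩ := hat
  have he := hcore.entry
  v_entry he
  simp only [depth] at he_room he_stack
  have hRA : g.RA = (g.e.reg .rsp).toNat := rfl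
  have hF : g.f = (g.e.reg .rdi).toNat := rfl
  have hR1 : g.R + 1480 = g.RA := by
    unfold Ghost.R
    simp only [steady]
    omega
  have hrsp : r.reg .rsp = g.e.reg .rsp - 1480 := by
    rw [hrspR]
    exact rsp_word he_room
  have hrbp : r.reg .rbp = g.e.reg .rdi := by
    rw [hrbpR, hF, addr_toNat]
  have w_eq : Mem.EqOn Vorbis.L.textLo Vorbis.L.textHi u₀.mem r.mem := hcore.code
  have hdf : r.flags .df = false := hinv.1
  have hmx : r.mxcsr &&& 0x1F80 = 0x1F80 := hinv.2
  have hsse := Vorbis.sseOK_of_abiInv hinv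
  have hfw := f_where' hcore.shadow hcore.offText hcore.callers hcore.hand
  rw [hRA, hF] at hfw
  have hobj : LiveIn A.2 g.frames' g.f Off.sizeof.stb_vorbis := obj_live hcore.hand
  have hd3 : Mdct.HD3 r.mem g.f := HD3.toMdct hcore.mid.header.HD3
  obtain ⟨k1, hk1⟩ := hd3.b1
  have hib1 := hib A.2 g.frames' A.1 k1
  have hrspA : addr g.R = g.e.reg .rsp - 1480 := rsp_word he_room
  have hrbpA : addr g.f = g.e.reg .rdi := by
    rw [hF, addr_toNat]
  clear hrspR hrbpR
  have hben1 : ∀ w, w ∈ [(⟨g.RA - 1888, g.R⟩ : Span)] → Benign g A.1 w := by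
    intro w hw
    have e1 : w = ⟨g.RA - 1888, g.R⟩ := List.mem_singleton.mp hw
    subst e1
    exact Or.inl ⟨Nat.le_refl _, Nat.le_refl _⟩
  have hpl1 : ∀ w, w ∈ [(⟨g.RA - 1888, g.R⟩ : Span)] →
      (g.RA - 1888 ≤ w.lo ∧ w.hi ≤ g.R) ∨ (g.f + 140 ≤ w.lo ∧ w.hi ≤ g.f + 152) ∨
        (g.R + 16 ≤ w.lo ∧ w.hi ≤ g.R + 20) := by
    intro w hw
    have e1 : w = ⟨g.RA - 1888, g.R⟩ := List.mem_singleton.mp hw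
    subst e1
    exact Or.inl ⟨Nat.le_refl _, Nat.le_refl _⟩
  rcases hrax with hrax1 | hrax0
  · -- eax = 1: on to the second call
    have htabs := htab0 hrax1
    u_walk hcode [hμ.vendor] until [Vorbis.L.start_decoder.cut276, Vorbis.L.start_decoder.cut4] span [Vorbis.L.textLo, Vorbis.L.textHi] side (v_side)
    -- the arm `je` taken contradicts `eax = 1`
    all_goals (first | (exfalso; exact absurd hbr_115fcb (by decide)) | skip)
    case check_115fd8 =>
      -- 0x115fd8: load4 f+0x9c (blocksize_1)
      have hun : ShadowUntouched r.mem s_115fd8.mem := by v_untouched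
      exact hobj.accSmall hcore.shadow hun _ 4 (by decide) (by u_omega) (by simp only [voff]; u_omega)
    case call_inv => v_inv
    case pre_115feb =>
      -- the precondition of `init_blocksize(f, 1, blocksize_1)`
      have hs : Mem.SameExcept [⟨g.RA - 1888, g.R⟩] r.mem s_115feb.mem := by
        rw [w_mem]
        u_same
      have hcore1 := core_carry_plain hcore hs hpl1
      have hrsp8 : (s_115feb.reg .rsp).toNat + 8 = g.R := by
        rw [w_rsp]
        u_omega
      have hrdi : (s_115feb.reg .rdi).toNat = g.f := by
        rw [w_rdi, hF]
      refine ⟨⟨⟨?_, hcore1.offText⟩, ?_, ?_, hcore.hand.arenaText⟩, ?_, ?_, ?_, hcore.hand.globals _ (by decide), hcore1.sh7⟩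
      · rw [hrsp8]
        exact hcore1.shadow
      · rw [hrdi]
        exact hobj.blockLive
      · rw [hrdi]
        exact hcore1.mid.arena
      · rw [hrdi]
        exact hobj
      · rw [arg32_def, w_rsi, Vorbis.toNat_ofBV32]
        decide
      · rw [arg32_def, w_rdx, Vorbis.toNat_ofBV32, BitVec.toNat_ofNat, Nat.mod_mod, bsize1_word _ _ hd3]
        have := hk1.cases
        have e : bsize r.mem g.f 1 % 2 ^ 32 = bsize r.mem g.f 1 := by omega
        rw [e]
        exact hk1
    case cont =>
      -- 0x115ff0: init_blocksize(f, 1, blocksize_1) has returned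
      simp only [X86.User.Spec.footprint, vspec, w_rsp_115feb] at w_same
      have e1 : (Word.ofBV 1#32).toNat % 2 ^ 32 = 1 := by
        rw [Vorbis.toNat_ofBV32]
        rfl
      rw [w_rsi_115feb, e1] at w_same
      obtain ⟨A', others', hext, htemps, _, harena, hshadow, hsub, hsup, hrax', hok, _⟩ := w_post
      have hs : Mem.SameExcept [⟨g.RA - 1888, g.R⟩] r.mem s_115feb.mem := by
        rw [w_mem_115feb]
        u_same
      have hcore1 := core_carry_plain hcore hs hpl1
      have hbs1 := bsize_keep hcore hs hben1 1
      have htabs1 : Tabs A10 A.1 s_115feb.mem g.f 0 := by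
        apply tabs_keep hcore htabs (by decide) hs hben1 _ (Arena.Extends.refl _)
        intro w hw
        have e1 : w = ⟨g.RA - 1888, g.R⟩ := List.mem_singleton.mp hw
        subst e1
        simp only []
        omega
      have hrsp8 : (s_115feb.reg .rsp).toNat + 8 = g.R := by
        rw [w_rsp_115feb]
        u_omega
      have hrN : (g.e.reg .rsp - 1488).toNat + 8 = g.R := by
        rw [← w_rsp_115feb]
        exact hrsp8
      have hrdi : (s_115feb.reg .rdi).toNat = g.f := by
        rw [w_rdi_115feb, hF]
      rw [hrdi] at harena hok
      rw [hrsp8] at hshadow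
      obtain ⟨hcore', hold', hbs⟩ := core_after_ib hcore1 (bN := 1) hrdi (by decide) hrN w_same
        hext htemps harena hshadow hsub hsup (by
          intro b' hb'
          have e : b' = 0 := by omega
          subst e
          exact htabs1)
      refine ReachVia.done (Or.inl ⟨A9, A10, (A', others'), i, w_rip, ?_, ?_, w_inv, hcore', hrax', ?_, ?_⟩)
      · rw [w_rsp]
        exact hrspA.symm
      · rw [w_kept .rbp rfl, hrbp]
        exact hrbpA.symm
      · exact hold'
      · intro h1
        have hn : arg32 s_115feb .rdx = bsize s_115febr.mem g.f 1 := by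
          rw [arg32_def, w_rdx_115feb, Vorbis.toNat_ofBV32, BitVec.toNat_ofNat, Nat.mod_mod, bsize1_word _ _ hd3, hbs 1, hbs1]
          have := hk1.cases
          omega
        have hbz : arg32 s_115feb .rsi = 1 := by
          rw [arg32_def, w_rsi_115feb, e1]
        have := hok h1
        rw [hn, hbz] at this
        obtain ⟨ht, hr⟩ := this
        have ho := hcore.ext10
        exact ⟨⟨ht.A.older ho, ht.B.older ho, ht.C.older ho, ht.window.older ho, ht.bit_reverse.older ho⟩, hr⟩
  · -- eax = 0: `je 113b22`
    u_walk hcode [hμ.vendor] until [Vorbis.L.start_decoder.cut276, Vorbis.L.start_decoder.cut4] span [Vorbis.L.textLo, Vorbis.L.textHi] side (v_side)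
    -- the arm `je` not taken contradicts `eax = 0`
    all_goals (first | (exfalso; exact absurd hbr_115fcb (by decide)) | skip)
    refine ReachVia.done (Or.inr ?_)
    rw [← w_mem] at hcore
    apply bodyERR_of_core hcore w_rip
    · rw [w_kept .rsp rfl, hrsp]
      exact hrspA.symm
    · v_inv
    · rw [w_kept .rax rfl, hrax0]
      rfl


/-- **0x115ff0 … 0x116055** (C line 4171's test, lines 4172 – 4173, 4186 – 4188): `eax = 0` → the epilogue; else `blocksize[0..1]`,
`r15d = b1`, `r13 = 2·b1`, `max_part_read = 0`, and the entry assertion of R17 (SD.11). -/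
theorem seg3 (Lay : Layout) (hLay : Lay.hi = 0x1000000) (μ : Microarch) (hμ : UserX.MicroOK μ) (u₀ : State)
    (hcode : HasCodeNat Lay u₀ Vorbis.L.start_decoder.entry Vorbis.Code.code_start_decoder.nat Vorbis.L.start_decoder.size)
    (hload4 : Asan.SmallCheck Lay μ Vorbis.WayInv (Vorbis.CodeOK u₀) [.rax, .rcx, .rdx] 4 Vorbis.L.__asan_load4_noabort.entry)
    (hstore4 : Asan.SmallCheck Lay μ Vorbis.WayInv (Vorbis.CodeOK u₀) [.rax, .rcx, .rdx] 4 Vorbis.L.__asan_store4_noabort.entry)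
    (g : Ghost) (r : State) (hat : AtRetIB u₀ g Vorbis.L.start_decoder.cut276 1 r) :
    ReachVia Lay μ WayInv r (fun w => AtR17 u₀ g 0 w ∨ AtERR u₀ g w) := by
  obtain ⟨A9, A10, A, i, w_rip, hrspR, hrbpR, hinv, hcore, hrax, htabs0, htab1⟩ := hat
  have he := hcore.entry
  v_entry he
  simp only [depth] at he_room he_stack
  have hRA : g.RA = (g.e.reg .rsp).toNat := rfl
  have hF : g.f = (g.e.reg .rdi).toNat := rfl
  have hR1 : g.R + 1480 = g.RA := by
    unfold Ghost.R
    simp only [steady]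
    omega
  have hrsp : r.reg .rsp = g.e.reg .rsp - 1480 := by
    rw [hrspR]
    exact rsp_word he_room
  have hrbp : r.reg .rbp = g.e.reg .rdi := by
    rw [hrbpR, hF, addr_toNat]
  have w_eq : Mem.EqOn Vorbis.L.textLo Vorbis.L.textHi u₀.mem r.mem := hcore.code
  have hdf : r.flags .df = false := hinv.1
  have hmx : r.mxcsr &&& 0x1F80 = 0x1F80 := hinv.2
  have hsse := Vorbis.sseOK_of_abiInv hinv
  have hfw := f_where' hcore.shadow hcore.offText hcore.callers hcore.hand
  rw [hRA, hF] at hfw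
  have hobj : LiveIn A.2 g.frames' g.f Off.sizeof.stb_vorbis := obj_live hcore.hand
  have hd3 : Mdct.HD3 r.mem g.f := HD3.toMdct hcore.mid.header.HD3
  have hz24 : r.mem.u32 (g.R + 0x24) = 0 := hcore.mid.consts.z24 (by omega) (by omega)
  have hrspA : addr g.R = g.e.reg .rsp - 1480 := rsp_word he_room
  have hrbpA : addr g.f = g.e.reg .rdi := by
    rw [hF, addr_toNat]
  clear hrspR hrbpR
  have hben1 : ∀ w, w ∈ [(⟨g.RA - 1888, g.R⟩ : Span)] → Benign g A.1 w := by
    intro w hw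
    have e1 : w = ⟨g.RA - 1888, g.R⟩ := List.mem_singleton.mp hw
    subst e1
    exact Or.inl ⟨Nat.le_refl _, Nat.le_refl _⟩
  have hpl1 : ∀ w, w ∈ [(⟨g.RA - 1888, g.R⟩ : Span)] →
      (g.RA - 1888 ≤ w.lo ∧ w.hi ≤ g.R) ∨ (g.f + 140 ≤ w.lo ∧ w.hi ≤ g.f + 152) ∨
        (g.R + 16 ≤ w.lo ∧ w.hi ≤ g.R + 20) := by
    intro w hw
    have e1 : w = ⟨g.RA - 1888, g.R⟩ := List.mem_singleton.mp hw
    subst e1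
    exact Or.inl ⟨Nat.le_refl _, Nat.le_refl _⟩
  rcases hrax with hrax1 | hrax0
  · -- eax = 1
    have htab1' := htab1 hrax1
    have htab0' := htabs0 0 (by decide)
    u_walk hcode [hμ.vendor] until [Vorbis.L.start_decoder.cut277, Vorbis.L.start_decoder.cut4] span [Vorbis.L.textLo, Vorbis.L.textHi] side (v_side)
    all_goals (first | (exfalso; exact absurd hbr_115ff2 (by decide)) | skip)
    case check_115fff =>
      -- 0x115fff: load4 f+0x98 (blocksize_0)
      have hun : ShadowUntouched r.mem s_115fff.mem := by v_untouched
      exact hobj.accSmall hcore.shadow hun _ 4 (by decide) (by u_omega) (by simp only [voff]; u_omega)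
    case check_116012 =>
      -- 0x116012: store4 f+0x90 (blocksize[0])
      have hun : ShadowUntouched r.mem s_116012.mem := by v_untouched
      exact hobj.accSmall hcore.shadow hun _ 4 (by decide) (by u_omega) (by simp only [voff]; u_omega)
    case check_116025 =>
      -- 0x116025: load4 f+0x9c (blocksize_1)
      have hun : ShadowUntouched r.mem s_116025.mem := by v_untouched
      exact hobj.accSmall hcore.shadow hun _ 4 (by decide) (by u_omega) (by simp only [voff]; u_omega)
    case check_116038 =>
      -- 0x116038: store4 f+0x94 (blocksize[1])
      have hun : ShadowUntouched r.mem s_116038.mem := by v_untouched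
      exact hobj.accSmall hcore.shadow hun _ 4 (by decide) (by u_omega) (by simp only [voff]; u_omega)
    case cont =>
      -- 0x116059: the exit to R17 (SD.11)
      have hb0 := hd3.b0.facts
      have hb1 := hd3.b1.facts
      have hw0 := bsize0_word r.mem g hd3
      have hw1 := bsize1_word r.mem g hd3
      have hs : Mem.SameExcept [⟨g.RA - 1888, g.R⟩, ⟨g.f + 144, g.f + 152⟩, ⟨g.R + 16, g.R + 20⟩] r.mem s_116055.mem := by
        rw [w_mem]
        u_same
      have hpl : ∀ w, w ∈ [(⟨g.RA - 1888, g.R⟩ : Span), ⟨g.f + 144, g.f + 152⟩, ⟨g.R + 16, g.R + 20⟩] →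
          (g.RA - 1888 ≤ w.lo ∧ w.hi ≤ g.R) ∨ (g.f + 140 ≤ w.lo ∧ w.hi ≤ g.f + 152) ∨
            (g.R + 16 ≤ w.lo ∧ w.hi ≤ g.R + 20) := by
        intro w hw
        simp only [List.mem_cons, List.mem_nil_iff, or_false] at hw
        rcases hw with rfl | rfl | rfl
        · exact Or.inl ⟨Nat.le_refl _, Nat.le_refl _⟩
        · exact Or.inr (Or.inl ⟨by simp only []; omega, Nat.le_refl _⟩)
        · exact Or.inr (Or.inr ⟨Nat.le_refl _, Nat.le_refl _⟩)
      have hben : ∀ w, w ∈ [(⟨g.RA - 1888, g.R⟩ : Span), ⟨g.f + 144, g.f + 152⟩, ⟨g.R + 16, g.R + 20⟩] →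
          Benign g A.1 w := by
        intro w hw
        unfold Benign
        rcases hpl w hw with h1 | h1 | h1
        · exact Or.inl h1
        · exact Or.inr (Or.inr (Or.inr (Or.inr (Or.inl h1))))
        · exact Or.inr (Or.inl h1)
      have hcoreF := core_carry_plain hcore hs hpl
      have hbsF := bsize_keep hcore hs hben
      have hoffT : ∀ b, b < 2 → ∀ w, w ∈ [(⟨g.RA - 1888, g.R⟩ : Span), ⟨g.f + 144, g.f + 152⟩, ⟨g.R + 16, g.R + 20⟩] →
          w.hi ≤ g.f + 1400 ∨ g.f + 1480 ≤ w.lo ∨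
          ((w.hi ≤ g.f + 1400 + 8 * b ∨ g.f + 1408 + 8 * b ≤ w.lo) ∧ (w.hi ≤ g.f + 1416 + 8 * b ∨ g.f + 1424 + 8 * b ≤ w.lo) ∧
            (w.hi ≤ g.f + 1432 + 8 * b ∨ g.f + 1440 + 8 * b ≤ w.lo) ∧ (w.hi ≤ g.f + 1448 + 8 * b ∨ g.f + 1456 + 8 * b ≤ w.lo) ∧
            (w.hi ≤ g.f + 1464 + 8 * b ∨ g.f + 1472 + 8 * b ≤ w.lo)) := by
        intro b hb w hw
        obtain ⟨q1, q2, q3⟩ := f_where' hcore.shadow hcore.offText hcore.callers hcore.hand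
        simp only [List.mem_cons, List.mem_nil_iff, or_false] at hw
        rcases hw with rfl | rfl | rfl <;> simp only [] <;> omega
      have ht0F := tabs_keep hcore htab0' (by decide) hs hben (hoffT 0 (by decide)) (Arena.Extends.refl _)
      have ht1F := tabs_keep hcore htab1' (by decide) hs hben (hoffT 1 (by decide)) (Arena.Extends.refl _)
      refine ReachVia.done (Or.inl ?_)
      apply r17_of_core hcoreF ht0F ht1F _ _ w_rip _ _ _ _ _ _
      · -- blocksize[0] = blocksize_0
        rw [blocksize0_word, bs0_word]
        have eR : s_116055.mem.readLE (g.e.reg .rdi + 152) 4 = bsize r.mem g.f 0 := by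
          u_frame hw0
        have eL : s_116055.mem.readLE (g.e.reg .rdi + 144) 4 =
            (BitVec.ofNat 32 (r.mem.readLE (g.e.reg .rdi + 152) 4)).toNat := by
          rw [w_mem]
          u_read
        have e : s_116055.mem.readLE (g.e.reg .rdi + 144) 4 = s_116055.mem.readLE (g.e.reg .rdi + 152) 4 := by
          rw [eL, eR, hw0, BitVec.toNat_ofNat]
          omega
        rw [e]
      · -- blocksize[1] = blocksize_1
        rw [blocksize1_word, bs1_word]
        have eR : s_116055.mem.readLE (g.e.reg .rdi + 156) 4 = bsize r.mem g.f 1 := by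
          u_frame hw1
        have eL : s_116055.mem.readLE (g.e.reg .rdi + 148) 4 =
            (BitVec.ofNat 32 (r.mem.readLE (g.e.reg .rdi + 156) 4)).toNat := by
          rw [w_mem]
          u_read
        have e : s_116055.mem.readLE (g.e.reg .rdi + 148) 4 = s_116055.mem.readLE (g.e.reg .rdi + 156) 4 := by
          rw [eL, eR, hw1, BitVec.toNat_ofNat]
          omega
        rw [e]
      · rw [w_rsp]
        exact hrspA.symm
      · v_inv
      · rw [w_kept .rbp rfl, hrbp]
        exact hrbpA.symm
      · -- max_part_read = 0 (the literal-0 slot `[R + 24H]`)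
        have e24 : addr (g.R + 0x24) = g.e.reg .rsp - 1444 := slot_word he_room 0x24 (by decide)
        have e10 : addr (g.R + 0x10) = g.e.reg .rsp - 1464 := slot_word he_room 0x10 (by decide)
        have hz : r.mem.readLE (g.e.reg .rsp - 1444) 4 = 0 := by
          rw [← e24]
          exact hz24
        unfold Mem.u32
        rw [e10, w_mem, Mem.readLE_writeLE_same _ _ _ _ (by decide), hz]
        rfl
      · rw [w_r15, hw1, hbsF 1]
        exact r15_val _ (by omega)
      · rw [w_r13, hw1, hbsF 1]
        exact r13_val _ (by omega)
  · -- eax = 0: `je 113b22`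
    u_walk hcode [hμ.vendor] until [Vorbis.L.start_decoder.cut277, Vorbis.L.start_decoder.cut4] span [Vorbis.L.textLo, Vorbis.L.textHi] side (v_side)
    all_goals (first | (exfalso; exact absurd hbr_115ff2 (by decide)) | skip)
    refine ReachVia.done (Or.inr ?_)
    rw [← w_mem] at hcore
    apply bodyERR_of_core hcore w_rip
    · rw [w_kept .rsp rfl, hrsp]
      exact hrspA.symm
    · v_inv
    · rw [w_kept .rax rfl, hrax0]
      rfl

end Vorbis.Spec.start_decoder_R15

/-- Segment R15 of `start_decoder` takes its entry assertion `AtR15` to `AtR16` (`i < channels`), `AtR17` (SD.11) or the epilogue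
`AtERR` (an `init_blocksize` returned 0). -/
theorem Vorbis.Spec.Worked.start_decoder_R15_ok : Vorbis.Spec.start_decoder_R15.Statement := by
  intro Lay hLay μ hμ u₀ hcode hload4 hib hstore4 g i v hat
  obtain ⟨A9, A, hb⟩ := hat
  have hfr := hb.frame
  have he := hfr.entry
  v_entry he
  obtain ⟨hR1, hR8⟩ := hfr.r_eq
  have hRA : g.RA = (g.e.reg .rsp).toNat := rfl
  have hF : g.f = (g.e.reg .rdi).toNat := rfl
  simp only [depth, steady] at hR1 he_room he_stack
  have w_rip := hfr.rip
  have hrsp : v.reg .rsp = g.e.reg .rsp - 1480 := by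
    rw [hfr.rsp]
    have e : g.R = (g.e.reg .rsp).toNat - 1480 := by omega
    rw [e]
    unfold addr
    rw [UInt64.ofNat_sub (by omega), UInt64.ofNat_toNat]
    rfl
  have hrbp : v.reg .rbp = g.e.reg .rdi := by
    rw [hb.rbp, hF, addr_toNat]
  have hr14 := hb.r14
  have w_eq : Mem.EqOn Vorbis.L.textLo Vorbis.L.textHi u₀.mem v.mem := hfr.code
  have hdf : v.flags .df = false := (show abiInv _ from hfr.inv).1
  have hmx : v.mxcsr &&& 0x1F80 = 0x1F80 := (show abiInv _ from hfr.inv).2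
  have hsse := Vorbis.sseOK_of_abiInv hfr.inv
  have hfw := Vorbis.Spec.start_decoder_R15.f_where hfr hb.hand
  rw [hRA, hF] at hfw
  have hobj : LiveIn A.2 g.frames' g.f Off.sizeof.stb_vorbis := Vorbis.Spec.start_decoder_R15.obj_live hb.hand
  have hi16 : i ≤ 16 := by
    have h1 := hb.mid.header.HD1
    have h2 := hb.i_le
    omega
  have hd3 : Mdct.HD3 v.mem g.f := HD3.toMdct hb.mid.header.HD3
  obtain ⟨k0, hk0⟩ := hd3.b0
  obtain ⟨k1, hk1⟩ := hd3.b1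
  have hib0 := hib A.2 g.frames' A.1 k0
  u_walk hcode [hμ.vendor] until [Vorbis.L.start_decoder.cut319, Vorbis.L.start_decoder.cut277, Vorbis.L.start_decoder.cut4] span [Vorbis.L.textLo, Vorbis.L.textHi] side (v_side)
  case check_115f9b =>
    -- 0x115f9b: load4 f+4 (channels)
    have hun : ShadowUntouched v.mem s_115f9b.mem := by v_untouched
    exact hobj.accSmall hfr.shadow hun _ 4 (by decide) (by u_omega) (by simp only [voff]; u_omega)
  case check_115fb1 =>
    -- 0x115fb1: load4 f+0x98 (blocksize_0)
    have hun : ShadowUntouched v.mem s_115fb1.mem := by v_untouched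
    exact hobj.accSmall hfr.shadow hun _ 4 (by decide) (by u_omega) (by simp only [voff]; u_omega)
  case cont =>
    -- 0x11665c: the exit to R16 (`i < channels`)
    refine ReachVia.done (Or.inl ⟨A9, A, ?_, ?_⟩)
    · apply Vorbis.Spec.start_decoder_R15.chan_carry_stack hb (ws := [⟨g.RA - 1888, g.R⟩]) (s := s_115fa4)
      · rw [w_mem]
        u_same
      · intro w hw
        have e1 : w = ⟨g.RA - 1888, g.R⟩ := List.mem_singleton.mp hw
        subst e1
        exact ⟨Nat.le_refl _, Nat.le_refl _⟩
      · exact w_rip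
      · rw [w_rsp, ← hrsp]
        exact hfr.rsp
      · rw [w_kept .rbp rfl]
        exact hb.rbp
      · rw [w_kept .r14 rfl]
        exact hb.r14
      · v_inv
    · -- `i < channels`, from the branch
      have hx : v.mem.readLE (g.e.reg .rdi + 4) 4 < 2 ^ 32 :=
        Nat.lt_of_lt_of_le (Mem.readLE_lt' _ _ 4) (by decide)
      have hlt := (Vorbis.Spec.start_decoder_R15.lt_of_branch i _ hi16 hx).mp hbr_115fa4
      have hs : Mem.SameExcept [⟨g.RA - 1888, g.R⟩] v.mem s_115fa4.mem := by
        rw [w_mem]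
        u_same
      have ech := Vorbis.Spec.start_decoder_R15.channels_carry_stack hb hs (by
        intro w hw
        have e1 : w = ⟨g.RA - 1888, g.R⟩ := List.mem_singleton.mp hw
        subst e1
        exact ⟨Nat.le_refl _, Nat.le_refl _⟩)
      rw [ech, Vorbis.Spec.start_decoder_R15.channels_word]
      exact hlt
  case call_inv => v_inv
  case pre_115fc4 =>
    -- the precondition of `init_blocksize(f, 0, blocksize_0)`
    have hx : v.mem.readLE (g.e.reg .rdi + 4) 4 < 2 ^ 32 :=
      Nat.lt_of_lt_of_le (Mem.readLE_lt' _ _ 4) (by decide)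
    have hge : stb_vorbis.channels v.mem g.f ≤ (i : Int) := by
      have h1 : ¬ (i : Int) < sint32 (v.mem.readLE (g.e.reg .rdi + 4) 4) :=
        fun hlt => hbr_115fa4 ((Vorbis.Spec.start_decoder_R15.lt_of_branch i _ hi16 hx).mpr hlt)
      rw [Vorbis.Spec.start_decoder_R15.channels_word]
      omega
    have hs : Mem.SameExcept [⟨g.RA - 1888, g.R⟩] v.mem s_115fc4.mem := by
      rw [w_mem]
      u_same
    have hcore := Vorbis.Spec.start_decoder_R15.core_carry_plain (Vorbis.Spec.start_decoder_R15.core_of_chan hb hge) hs (by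
      intro w hw
      have e1 : w = ⟨g.RA - 1888, g.R⟩ := List.mem_singleton.mp hw
      subst e1
      exact Or.inl ⟨Nat.le_refl _, Nat.le_refl _⟩)
    have hrsp8 : (s_115fc4.reg .rsp).toNat + 8 = g.R := by
      rw [w_rsp]
      u_omega
    have hrdi : (s_115fc4.reg .rdi).toNat = g.f := by
      rw [w_rdi, hF]
    have hd3' : Mdct.HD3 s_115fc4.mem g.f := HD3.toMdct hcore.mid.header.HD3
    refine ⟨⟨⟨?_, hcore.offText⟩, ?_, ?_, hb.hand.arenaText⟩, ?_, ?_, ?_, hb.hand.globals _ (by decide), hcore.sh7⟩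
    · rw [hrsp8]
      exact hcore.shadow
    · rw [hrdi]
      exact hobj.blockLive
    · rw [hrdi]
      exact hcore.mid.arena
    · rw [hrdi]
      exact hobj
    · rw [arg32_def, w_rsi, Vorbis.toNat_ofBV32]
      decide
    · rw [arg32_def, w_rdx, Vorbis.toNat_ofBV32, BitVec.toNat_ofNat, Nat.mod_mod,
        Vorbis.Spec.start_decoder_R15.bsize0_word _ _ hd3]
      have := hk0.cases
      have e : bsize v.mem g.f 0 % 2 ^ 32 = bsize v.mem g.f 0 := by omega
      rw [e]
      exact hk0
  case cont =>
    -- 0x115fc9: init_blocksize(f, 0, blocksize_0) has returned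
    simp only [X86.User.Spec.footprint, vspec, w_rsp_115fc4] at w_same
    have e0 : (Word.ofBV 0#32).toNat % 2 ^ 32 = 0 := by
      rw [Vorbis.toNat_ofBV32]
      rfl
    rw [w_rsi_115fc4, e0] at w_same
    obtain ⟨A', others', hext, htemps, _, harena, hshadow, hsub, hsup, hrax, hok, _⟩ := w_post
    have hx : v.mem.readLE (g.e.reg .rdi + 4) 4 < 2 ^ 32 :=
      Nat.lt_of_lt_of_le (Mem.readLE_lt' _ _ 4) (by decide)
    have hge : stb_vorbis.channels v.mem g.f ≤ (i : Int) := by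
      have h1 : ¬ (i : Int) < sint32 (v.mem.readLE (g.e.reg .rdi + 4) 4) :=
        fun hlt => hbr_115fa4 ((Vorbis.Spec.start_decoder_R15.lt_of_branch i _ hi16 hx).mpr hlt)
      rw [Vorbis.Spec.start_decoder_R15.channels_word]
      omega
    have hs : Mem.SameExcept [⟨g.RA - 1888, g.R⟩] v.mem s_115fc4.mem := by
      rw [w_mem_115fc4]
      u_same
    have hws : ∀ w, w ∈ [(⟨g.RA - 1888, g.R⟩ : Span)] → Vorbis.Spec.start_decoder_R15.Benign g A.1 w := by
      intro w hw
      have e1 : w = ⟨g.RA - 1888, g.R⟩ := List.mem_singleton.mp hw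
      subst e1
      exact Or.inl ⟨Nat.le_refl _, Nat.le_refl _⟩
    have hcore0 := Vorbis.Spec.start_decoder_R15.core_of_chan hb hge
    have hcore := Vorbis.Spec.start_decoder_R15.core_carry_plain hcore0 hs (by
      intro w hw
      have e1 : w = ⟨g.RA - 1888, g.R⟩ := List.mem_singleton.mp hw
      subst e1
      exact Or.inl ⟨Nat.le_refl _, Nat.le_refl _⟩)
    have hbs0 := Vorbis.Spec.start_decoder_R15.bsize_keep hcore0 hs hws 0
    have hrsp8 : (s_115fc4.reg .rsp).toNat + 8 = g.R := by
      rw [w_rsp_115fc4]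
      u_omega
    have hrN : (g.e.reg .rsp - 1488).toNat + 8 = g.R := by
      rw [← w_rsp_115fc4]
      exact hrsp8
    have hrdi : (s_115fc4.reg .rdi).toNat = g.f := by
      rw [w_rdi_115fc4, hF]
    rw [hrdi] at harena hok
    rw [hrsp8] at hshadow
    obtain ⟨hcore', _, hbs⟩ := Vorbis.Spec.start_decoder_R15.core_after_ib hcore (bN := 0) hrdi (by decide) hrN w_same
      hext htemps harena hshadow hsub hsup (fun b' hb' => absurd hb' (Nat.not_lt_zero _))
    refine ReachVia.trans (Vorbis.Spec.start_decoder_R15.seg2 Lay hLay μ hμ u₀ hcode hload4 hib g s_115fc4r ?_) ?_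
    rotate_left
    · -- the rest of the segment: `seg2`, then `seg3`
      intro w hw
      rcases hw with h2 | herr
      · refine (Vorbis.Spec.start_decoder_R15.seg3 Lay hLay μ hμ u₀ hcode hload4 hstore4 g w h2).mono ?_
        intro x hx
        rcases hx with h17 | herr
        · exact Or.inr (Or.inl h17)
        · exact Or.inr (Or.inr herr)
      · exact ReachVia.done (Or.inr (Or.inr herr))
    refine ⟨A9, A.1, (A', others'), i, w_rip, ?_, ?_, w_inv, hcore', hrax, fun b hb => absurd hb (Nat.not_lt_zero _), ?_⟩
    · rw [w_rsp]
      exact (Vorbis.Spec.start_decoder_R15.rsp_word he_room).symm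
    · rw [w_kept .rbp rfl]
      exact hb.rbp
    · intro h1
      have hn : arg32 s_115fc4 .rdx = bsize s_115fc4r.mem g.f 0 := by
        rw [arg32_def, w_rdx_115fc4, Vorbis.toNat_ofBV32, BitVec.toNat_ofNat, Nat.mod_mod,
          Vorbis.Spec.start_decoder_R15.bsize0_word _ _ hd3, hbs 0, hbs0]
        have := hk0.cases
        omega
      have hbz : arg32 s_115fc4 .rsi = 0 := by
        rw [arg32_def, w_rsi_115fc4, e0]
      have := hok h1
      rw [hn, hbz] at this
      exact this
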